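-- pv_equiv track=rewrite | github.com/grensoh/informatique1 | mission4/bioinfo.py | distances_matrice
-- ===== SOURCE A (Python) =====
-- char_adn = ['a','t','c','g'] #loiste des caractères acceptés
--
-- def is_adn(s): #fonction vérifiant si une chaine de caractère est de l'adn
--     is_adn = True
--     s = s.lower() #on met tout en minuscule
--     for i in s:
--         if i not in char_adn: #on regarde si l'élément ne se trouve pas dans la liste
--             is_adn = False #si oui, la variable bascule sur False
--     return is_adn
--
-- def distance_h(s, p): #fonction regardanbt le nombre de termes identiques entre s et p
--     distance = 0
--     if is_adn(s) and is_adn(p): #on vérifie si c'est de l'adn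
--         if len(s) != len(p): #on vérifie que s et p sont de même longueur
--             return None
--         else:
--             for i in range(len(s)): #pour chaque élément on vérifie s'il est identique à l'élément correspondant dans l'autre chaine
--                 if s[i] != p[i]:
--                     distance += 1 #si différent -> on ajoute 1 à la distance
--             return distance
--     else:
--         return None
--
-- def distances_matrice(l): #fonction vérifiant le nombre de termes identiques entre chaque chaines d'une liste
--     distance = []
--     for i in range(len(l)): #pour chaque chaine de caractères, on la compare avec chaque chaine de caractères de la liste
--         tempo = []
--         for j in range(len(l)):
--             tempo.append(distance_h(l[i], l[j])) #on appelle distance_h pour compter le nombre d'éléments différents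
--         distance.append(tempo)
--     return distance
-- ===== SOURCE B (Python) =====
-- char_adn = ['a', 't', 'c', 'g']
--
--
-- def distances_matrice(l):
--     n = len(l)
--     valid = [all(c in char_adn for c in s.lower()) for s in l]
--     m = [[None] * n for _ in range(n)]
--     for i in range(n):
--         if valid[i]:
--             m[i][i] = 0
--         for j in range(i + 1, n):
--             if valid[i] and valid[j] and len(l[i]) == len(l[j]):
--                 d = sum(a != b for a, b in zip(l[i], l[j]))
--                 m[i][j] = d
--                 m[j][i] = d
--     return m
-- ===== Notes on version B (the rewrite author's own statement) =====
-- stated objective: faster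
-- what changed: B precomputes each string's DNA-validity once and fills only the upper triangle of a preallocated None matrix, mirroring each Hamming count into the lower half, instead of A's full n×n double loop that revalidates both strings and recounts the distance for every ordered pair.
import Mathlib
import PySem

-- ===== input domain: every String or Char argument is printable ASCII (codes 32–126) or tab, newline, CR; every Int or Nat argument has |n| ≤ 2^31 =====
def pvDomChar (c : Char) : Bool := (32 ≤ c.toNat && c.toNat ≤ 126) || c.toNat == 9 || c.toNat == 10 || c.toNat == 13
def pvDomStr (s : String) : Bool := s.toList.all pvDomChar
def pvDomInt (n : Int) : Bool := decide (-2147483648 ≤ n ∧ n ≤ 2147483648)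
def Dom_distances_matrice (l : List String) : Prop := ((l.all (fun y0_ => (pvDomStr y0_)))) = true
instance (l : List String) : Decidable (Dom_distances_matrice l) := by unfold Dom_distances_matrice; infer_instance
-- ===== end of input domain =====

-- B precomputes each string's validity once and fills only the upper triangle (one Hamming
-- count per unordered pair), mirroring it into the lower half, instead of A's full n×n loop
-- that revalidates both strings for every ordered pair.

-- ===== PORT A =====
def pv_char_adn : List Char := ['a', 't', 'c', 'g']

def is_adn (s : String) : Bool :=
  (PySem.Str.lower s).toList.foldl
    (fun b c => if !(pv_char_adn.contains c) then false else b) true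

def distance_h (s p : String) : Option Int :=
  if is_adn s && is_adn p then
    if PySem.Str.len s ≠ PySem.Str.len p then none
    else
      some ((PySem.List.pyRange 0 (PySem.Str.len s) 1).foldl
        (fun d i => if PySem.Str.pyGet? s i ≠ PySem.Str.pyGet? p i then d + 1 else d) 0)
  else none

def distances_matrice (l : List String) : List (List (Option Int)) :=
  (PySem.List.pyRange 0 l.length 1).foldl
    (fun distance i =>
      distance ++ [(PySem.List.pyRange 0 l.length 1).foldl
        (fun tempo j =>
          tempo ++ [distance_h ((PySem.List.pyGet? l i).getD "") ((PySem.List.pyGet? l j).getD "")]) []])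
    []

-- ===== PORT B =====
def bValid (s : String) : Bool :=
  (PySem.Str.lower s).toList.all (fun c => pv_char_adn.contains c)

def bHam (s p : String) : Int :=
  ((s.toList.zip p.toList).countP (fun ab => ab.1 != ab.2) : Int)

def bSetCell (m : List (List (Option Int))) (i j : Nat) (v : Option Int) :
    List (List (Option Int)) :=
  m.set i ((m.getD i []).set j v)

def distances_matrice_alt (l : List String) : List (List (Option Int)) :=
  let n := l.length
  let valid := l.map bValid
  (List.range n).foldl
    (fun m i =>
      let m1 := if valid.getD i false then bSetCell m i i (some 0) else m
      (List.range' (i + 1) (n - (i + 1))).foldl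
        (fun m j =>
          if valid.getD i false && valid.getD j false &&
              (PySem.Str.len (l.getD i "") == PySem.Str.len (l.getD j "")) then
            let d := bHam (l.getD i "") (l.getD j "")
            bSetCell (bSetCell m i j (some d)) j i (some d)
          else m)
        m1)
    (List.replicate n (List.replicate n (none : Option Int)))

-- ===== PRECONDITION & SPEC =====
def Spec_distances_matrice (l : List String) (out : List (List (Option Int))) : Prop := out = distances_matrice_alt l
instance (l : List String) (out : List (List (Option Int))) : Decidable (Spec_distances_matrice l out) := by unfold Spec_distances_matrice; infer_instance

-- ===== CLAIM (what is proved, stated in full; the proofs are below) =====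
def Claim_equal_distances_matrice : Prop := ∀ (l : List String), Dom_distances_matrice l → Spec_distances_matrice l (distances_matrice l)

-- ===== LEMMAS AND PROOFS =====

-- the cell value A computes at (i, j)
def cellA (l : List String) (i j : Nat) : Option Int :=
  distance_h (l.getD i "") (l.getD j "")

-- the cell value B's triangular fill is meant to leave at (i, j)
def cellB (l : List String) (i j : Nat) : Option Int :=
  if bValid (l.getD i "") && bValid (l.getD j "") &&
      (PySem.Str.len (l.getD i "") == PySem.Str.len (l.getD j "")) then
    some (bHam (l.getD i "") (l.getD j ""))
  else none

-- B's matrix after the rows before i are done and, in row i, the cells up to column t: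
-- cell (r, c) is filled exactly when min r c < i, or min r c = i with max r c < t
def partialM (l : List String) (i t : Nat) : List (List (Option Int)) :=
  (List.range l.length).map (fun r =>
    (List.range l.length).map (fun c =>
      if min r c < i ∨ (min r c = i ∧ max r c < t) then cellB l r c else none))

theorem is_adn_eq_bValid (s : String) : is_adn s = bValid s := by
  unfold is_adn bValid
  rw [PySem.List.foldl_if_false_eq]
  simp [List.all_eq_not_any_not]

theorem eq_of_mem_zip_self {a b : Char} {cs : List Char} (h : (a, b) ∈ cs.zip cs) : a = b := by
  induction cs with
  | nil => simp at h
  | cons c cs ih =>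
    simp only [List.zip_cons_cons, List.mem_cons, Prod.mk.injEq] at h
    rcases h with ⟨rfl, rfl⟩ | h
    · rfl
    · exact ih h

theorem bHam_self (s : String) : bHam s s = 0 := by
  unfold bHam
  norm_num [List.countP_eq_zero]
  intro a b h
  simpa using eq_of_mem_zip_self h

theorem countP_ne_comm (cs ds : List Char) :
    (cs.zip ds).countP (fun ab => ab.1 != ab.2) = (ds.zip cs).countP (fun ab => ab.1 != ab.2) := by
  induction cs generalizing ds with
  | nil => cases ds <;> simp
  | cons c cs ih =>
    cases ds with
    | nil => simp
    | cons d ds =>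
      simp only [List.zip_cons_cons, List.countP_cons, ih ds]
      by_cases h : c = d
      · simp [h]
      · simp [h, Ne.symm h]

theorem bHam_comm (s p : String) : bHam s p = bHam p s := by
  unfold bHam; exact congrArg Nat.cast (countP_ne_comm s.toList p.toList)

theorem count_range_zip (cs ds : List Char) (h : cs.length = ds.length) :
    (List.range cs.length).countP (fun k => decide (cs[k]? ≠ ds[k]?))
      = (cs.zip ds).countP (fun ab => ab.1 != ab.2) := by
  induction cs generalizing ds with
  | nil => simp
  | cons c cs ih =>
    cases ds with
    | nil => simp at h
    | cons d ds =>
      simp only [List.length_cons, List.range_succ_eq_map, List.countP_cons, List.countP_map,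
        List.zip_cons_cons, List.getElem?_cons_zero]
      have hf : ((fun k => decide ((c :: cs)[k]? ≠ (d :: ds)[k]?)) ∘ Nat.succ)
          = fun k => decide (cs[k]? ≠ ds[k]?) := by
        funext k; simp
      rw [hf, ih ds (by simpa using h)]
      by_cases hcd : c = d <;> simp [hcd]

theorem dh_eq (s p : String) :
    distance_h s p
      = if bValid s && bValid p && (PySem.Str.len s == PySem.Str.len p) then
          some (bHam s p)
        else none := by
  unfold distance_h
  rw [is_adn_eq_bValid, is_adn_eq_bValid]
  cases hv : (bValid s && bValid p) with
  | false => simp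
  | true =>
    simp only [Bool.true_and]
    by_cases hl : s.length = p.length
    · rw [if_pos trivial, if_neg (by simp [PySem.Str.len_eq, hl]),
        if_pos (by simp [PySem.Str.len_eq, hl])]
      congr 1
      rw [PySem.List.foldl_ite_add_one (fun i => PySem.Str.pyGet? s i ≠ PySem.Str.pyGet? p i),
        zero_add]
      unfold bHam
      congr 1
      rw [show PySem.Str.len s = ((s.toList.length : Nat) : Int) by simp [PySem.Str.len_eq]]
      rw [PySem.List.pyRange_zero_nat, List.countP_map]
      rw [show ((fun i => decide (PySem.Str.pyGet? s i ≠ PySem.Str.pyGet? p i)) ∘ fun (k : Nat) => ((k : Int)))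
            = (fun (k : Nat) => decide (s.toList[k]? ≠ p.toList[k]?)) from by funext k; simp [pysem]]
      exact count_range_zip _ _ (by simpa using hl)
    · rw [if_pos trivial, if_pos (by simp [PySem.Str.len_eq, hl]),
        if_neg (by simp [PySem.Str.len_eq, hl])]

theorem cellA_eq_cellB (l : List String) (i j : Nat) : cellA l i j = cellB l i j := by
  unfold cellA cellB
  exact dh_eq _ _

theorem A_char (l : List String) :
    distances_matrice l
      = (List.range l.length).map (fun i => (List.range l.length).map (fun j => cellA l i j)) := by
  unfold distances_matrice
  rw [PySem.List.pyRange_zero_nat, List.foldl_map, PySem.List.foldl_append_singleton_eq_map]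
  simp only [List.nil_append]
  refine List.map_congr_left fun i hi => ?_
  rw [List.foldl_map, PySem.List.foldl_append_singleton_eq_map]
  simp only [List.nil_append]
  refine List.map_congr_left fun j hj => ?_
  unfold cellA
  simp [pysem, List.getD_eq_getElem?_getD]

theorem valid_getD (l : List String) (i : Nat) (hi : i < l.length) :
    (l.map bValid).getD i false = bValid (l.getD i "") := by
  simp [List.getD_eq_getElem?_getD, List.getElem?_map, List.getElem?_eq_getElem hi]

theorem set_map_range {α : Type} (n c : Nat) (g : Nat → α) (v : α) :
    ((List.range n).map g).set c v = (List.range n).map (fun b => if b = c then v else g b) := by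
  apply List.ext_getElem
  · simp
  · intro a h1 h2
    simp only [List.getElem_set, List.getElem_map, List.getElem_range]
    by_cases hac : a = c
    · simp [hac]
    · rw [if_neg (fun h => hac h.symm), if_neg hac]

theorem getD_map_range {α : Type} (n r : Nat) (g : Nat → α) (d : α) (hr : r < n) :
    ((List.range n).map g).getD r d = g r := by
  simp [List.getD_eq_getElem?_getD, List.getElem?_map, List.getElem?_range hr]

theorem bSetCell_map_range (n r c : Nat) (hr : r < n) (f : Nat → Nat → Option Int)
    (v : Option Int) :
    bSetCell ((List.range n).map fun a => (List.range n).map (f a)) r c v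
      = (List.range n).map fun a =>
          (List.range n).map (fun b => if a = r ∧ b = c then v else f a b) := by
  unfold bSetCell
  rw [getD_map_range n r _ [] hr, set_map_range, set_map_range]
  refine List.map_congr_left fun a ha => ?_
  by_cases har : a = r
  · subst har
    rw [if_pos rfl]
    refine List.map_congr_left fun b hb => ?_
    by_cases hbc : b = c
    · rw [if_pos hbc, if_pos ⟨rfl, hbc⟩]
    · rw [if_neg hbc, if_neg (fun h => hbc h.2)]
  · rw [if_neg har]
    refine List.map_congr_left fun b hb => ?_
    rw [if_neg (fun h => har h.1)]

theorem cond_symm_true (x y : Bool) (a b : Int)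
    (h : (x && y && (a == b)) = true) : (y && x && (b == a)) = true := by
  simp only [Bool.and_eq_true, beq_iff_eq] at h ⊢
  exact ⟨⟨h.1.2, h.1.1⟩, h.2.symm⟩

theorem cond_symm_false (x y : Bool) (a b : Int)
    (h : (x && y && (a == b)) = false) : (y && x && (b == a)) = false := by
  cases hyx : (y && x && (b == a)) with
  | false => rfl
  | true => rw [cond_symm_true y x b a hyx] at h; exact h

theorem diag_step (l : List String) (i : Nat) (hi : i < l.length) :
    (if (l.map bValid).getD i false then bSetCell (partialM l i 0) i i (some 0)
      else partialM l i 0)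
      = partialM l i (i + 1) := by
  rw [valid_getD l i hi]
  unfold partialM
  cases hv : bValid (l.getD i "") with
  | true =>
    rw [if_pos rfl, bSetCell_map_range l.length i i hi]
    refine List.map_congr_left fun a ha => List.map_congr_left fun b hb => ?_
    by_cases hab : a = i ∧ b = i
    · obtain ⟨rfl, rfl⟩ := hab
      rw [if_pos ⟨rfl, rfl⟩, if_pos (by omega)]
      unfold cellB
      rw [if_pos (by simp only [hv, beq_self_eq_true, Bool.and_self]), bHam_self]
    · rw [if_neg hab]
      exact if_congr (by omega) rfl rfl
  | false =>
    rw [if_neg (by simp)]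
    refine List.map_congr_left fun a ha => List.map_congr_left fun b hb => ?_
    by_cases hab : a = i ∧ b = i
    · have hcell : cellB l i i = none := by
        unfold cellB
        rw [if_neg (by simp only [hv, Bool.false_and]; exact Bool.false_ne_true)]
      obtain ⟨rfl, rfl⟩ := hab
      rw [if_neg (by omega), if_pos (by omega), hcell]
    · exact if_congr (by omega) rfl rfl

theorem inner_step (l : List String) (i j : Nat) (hij : i < j) (hj : j < l.length) :
    (if (l.map bValid).getD i false && (l.map bValid).getD j false &&
          (PySem.Str.len (l.getD i "") == PySem.Str.len (l.getD j "")) then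
        bSetCell (bSetCell (partialM l i j) i j (some (bHam (l.getD i "") (l.getD j "")))) j i
          (some (bHam (l.getD i "") (l.getD j "")))
      else partialM l i j)
      = partialM l i (j + 1) := by
  rw [valid_getD l i (by omega), valid_getD l j hj]
  cases hc : (bValid (l.getD i "") && bValid (l.getD j "") &&
      (PySem.Str.len (l.getD i "") == PySem.Str.len (l.getD j ""))) with
  | true =>
    rw [if_pos rfl]
    unfold partialM
    rw [bSetCell_map_range l.length i j (by omega), bSetCell_map_range l.length j i hj]
    refine List.map_congr_left fun a ha => List.map_congr_left fun b hb => ?_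
    by_cases h1 : a = j ∧ b = i
    · obtain ⟨rfl, rfl⟩ := h1
      rw [if_pos ⟨rfl, rfl⟩, if_pos (by omega)]
      unfold cellB
      rw [if_pos (cond_symm_true _ _ _ _ hc), bHam_comm]
    · rw [if_neg h1]
      by_cases h2 : a = i ∧ b = j
      · obtain ⟨rfl, rfl⟩ := h2
        rw [if_pos ⟨rfl, rfl⟩, if_pos (by omega)]
        unfold cellB
        rw [if_pos hc]
      · rw [if_neg h2]
        exact if_congr (by omega) rfl rfl
  | false =>
    rw [if_neg (by simp)]
    unfold partialM
    refine List.map_congr_left fun a ha => List.map_congr_left fun b hb => ?_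
    by_cases h1 : a = i ∧ b = j
    · have hcell : cellB l i j = none := by
        unfold cellB
        rw [if_neg (by rw [hc]; exact Bool.false_ne_true)]
      obtain ⟨rfl, rfl⟩ := h1
      rw [if_neg (by omega), if_pos (by omega), hcell]
    · by_cases h2 : a = j ∧ b = i
      · have hcell : cellB l j i = none := by
          unfold cellB
          rw [if_neg (by rw [cond_symm_false _ _ _ _ hc]; exact Bool.false_ne_true)]
        obtain ⟨rfl, rfl⟩ := h2
        rw [if_neg (by omega), if_pos (by omega), hcell]
      · exact if_congr (by omega) rfl rfl

theorem inner_fold (l : List String) (i : Nat) (hi : i < l.length) :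
    ∀ t, i + 1 + t ≤ l.length →
    (List.range' (i + 1) t).foldl
      (fun m j =>
        if (l.map bValid).getD i false && (l.map bValid).getD j false &&
            (PySem.Str.len (l.getD i "") == PySem.Str.len (l.getD j "")) then
          bSetCell (bSetCell m i j (some (bHam (l.getD i "") (l.getD j "")))) j i
            (some (bHam (l.getD i "") (l.getD j "")))
        else m)
      (partialM l i (i + 1))
      = partialM l i (i + 1 + t) := by
  intro t
  induction t with
  | zero => intro _; simp
  | succ t ih =>
    intro ht
    rw [List.range'_concat, List.foldl_append, ih (by omega)]
    simp only [List.foldl_cons, List.foldl_nil, one_mul]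
    rw [inner_step l i (i + 1 + t) (by omega) (by omega)]
    congr 1

theorem outer_fold (l : List String) :
    ∀ k, k ≤ l.length →
    (List.range k).foldl
      (fun m i =>
        (List.range' (i + 1) (l.length - (i + 1))).foldl
          (fun m j =>
            if (l.map bValid).getD i false && (l.map bValid).getD j false &&
                (PySem.Str.len (l.getD i "") == PySem.Str.len (l.getD j "")) then
              bSetCell (bSetCell m i j (some (bHam (l.getD i "") (l.getD j "")))) j i
                (some (bHam (l.getD i "") (l.getD j "")))
            else m)
          (if (l.map bValid).getD i false then bSetCell m i i (some 0) else m))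
      (partialM l 0 0)
      = partialM l k 0 := by
  intro k
  induction k with
  | zero => intro _; simp
  | succ k ih =>
    intro hk
    rw [List.range_succ, List.foldl_append, ih (by omega)]
    simp only [List.foldl_cons, List.foldl_nil]
    rw [diag_step l k (by omega), inner_fold l k (by omega) (l.length - (k + 1)) (by omega)]
    unfold partialM
    refine List.map_congr_left fun a ha => List.map_congr_left fun b hb => ?_
    simp only [List.mem_range] at ha hb
    exact if_congr (by omega) rfl rfl

theorem partial_zero (l : List String) :
    List.replicate l.length (List.replicate l.length (none : Option Int)) = partialM l 0 0 := by
  unfold partialM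
  simp

theorem B_char (l : List String) :
    distances_matrice_alt l
      = (List.range l.length).map (fun i => (List.range l.length).map (fun j => cellB l i j)) := by
  unfold distances_matrice_alt
  simp only []
  rw [partial_zero, outer_fold l l.length le_rfl]
  unfold partialM
  refine List.map_congr_left fun a ha => List.map_congr_left fun b hb => ?_
  simp only [List.mem_range] at ha hb
  rw [if_pos (by omega)]

-- ===== VERDICT (by name: the statement is the Claim_ definition above) =====
theorem distances_matrice_spec : Claim_equal_distances_matrice := by
  intro l _
  unfold Spec_distances_matrice
  rw [A_char, B_char]
  exact List.map_congr_left fun i _ => List.map_congr_left fun j _ => cellA_eq_cellB l i j
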